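-- pv_equiv track=rewrite | github.com/danielmares32/quiltCompiler | quilt.py | sew
-- ===== SOURCE A (Python) =====
-- def createQuilt(h, w):
--     mat = [[0 for x in range(w)] for y in range(h)]
--     return mat
--
-- def sew(q1, q2):
--     q1H = len(q1)
--     q1W = len(q1[0])
--     q2H = len(q2)
--     q2W = len(q2[0])
--     newQ = createQuilt(q1H, q1W + q2W)
--     for i in range(len(newQ)):
--         for j in range(len(newQ[0])):
--             if j<q1W :
--                 newQ[i][j] = q1[i][j]
--             else:
--                 newQ[i][j] = q2[i][j-q1W]
--     return newQ
-- ===== SOURCE B (Python) =====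
-- def sew(q1, q2):
--     q1W = len(q1[0])
--     q2W = len(q2[0])
--     return [q1[i][:q1W] + q2[i][:q2W] for i in range(len(q1))]
-- ===== Notes on version B (the rewrite author's own statement) =====
-- stated objective: simpler
-- what changed: Replaces the zero-matrix allocation plus nested per-cell copy (with a j<q1W branch) by one per-row pass concatenating the width-bounded slices q1[i][:q1W] + q2[i][:q2W]; the per-cell interpreted loop becomes one C-level slice+concat per row.
-- outside the precondition, e.g. on sew([[], []], [[]]): A returns [[], []], B raises IndexError
import Mathlib
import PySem

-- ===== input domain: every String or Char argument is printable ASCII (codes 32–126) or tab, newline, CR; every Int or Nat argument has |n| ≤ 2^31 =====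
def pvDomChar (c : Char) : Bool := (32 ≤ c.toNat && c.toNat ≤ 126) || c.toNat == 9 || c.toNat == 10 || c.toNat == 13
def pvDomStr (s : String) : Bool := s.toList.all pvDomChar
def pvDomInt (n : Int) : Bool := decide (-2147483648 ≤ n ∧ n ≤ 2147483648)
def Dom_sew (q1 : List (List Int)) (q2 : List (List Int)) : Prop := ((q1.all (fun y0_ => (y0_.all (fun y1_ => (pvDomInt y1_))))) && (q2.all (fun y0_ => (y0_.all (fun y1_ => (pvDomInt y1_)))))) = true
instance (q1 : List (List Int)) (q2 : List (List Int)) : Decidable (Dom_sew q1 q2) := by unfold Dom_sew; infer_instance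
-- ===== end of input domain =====

-- B replaces A's zero-matrix allocation and nested cell-by-cell copy (with a j<q1W branch)
-- by a single per-row pass concatenating the width-bounded slices q1[i][:q1W] + q2[i][:q2W]  (objective: simpler).

-- ===== PORT A =====
def createQuilt (h w : Nat) : List (List Int) :=
  (List.range h).map (fun _ => (List.range w).map (fun _ => (0 : Int)))

def sew (q1 : List (List Int)) (q2 : List (List Int)) : List (List Int) :=
  let q1H := q1.length
  let q1W := (PySem.List.pyGetD q1 0 []).length
  let q2W := (PySem.List.pyGetD q2 0 []).length
  let newQ := createQuilt q1H (q1W + q2W)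
  (List.range newQ.length).foldl (fun acc i =>
    (List.range (PySem.List.pyGetD acc 0 []).length).foldl (fun acc2 j =>
      acc2.modify i (fun row => row.set j
        (if j < q1W then PySem.List.pyGetD (PySem.List.pyGetD q1 (i : Int) []) (j : Int) 0
         else PySem.List.pyGetD (PySem.List.pyGetD q2 (i : Int) []) ((j : Int) - (q1W : Int)) 0)))
      acc) newQ

-- ===== PORT B =====
def sew_alt (q1 : List (List Int)) (q2 : List (List Int)) : List (List Int) :=
  let q1W := (PySem.List.pyGetD q1 0 []).length
  let q2W := (PySem.List.pyGetD q2 0 []).length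
  (List.range q1.length).map (fun (i : Nat) =>
    (PySem.List.pyGetD q1 (i : Int) []).take q1W ++ (PySem.List.pyGetD q2 (i : Int) []).take q2W)

-- ===== PRECONDITION & SPEC =====
-- Pre_ excludes the inputs where A raises IndexError (an empty quilt, or a row shorter than its
-- quilt's first-row width within the sewn height) and the degenerate corner where both first rows
-- give widths that never make A touch q2 beyond its height (q2 shorter than q1 with zero relevant
-- width), on which A's returned value is an accident of its loop never firing while B indexes q2[i].
def Pre_sew (q1 : List (List Int)) (q2 : List (List Int)) : Prop :=
  q1 ≠ [] ∧ q2 ≠ [] ∧ q1.length ≤ q2.length ∧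
  (∀ r ∈ q1, (q1.getD 0 []).length ≤ r.length) ∧
  (∀ i, i < q1.length → (q2.getD 0 []).length ≤ (q2.getD i []).length)
instance (q1 : List (List Int)) (q2 : List (List Int)) : Decidable (Pre_sew q1 q2) := by
  unfold Pre_sew; infer_instance

def pvWitness_sew : List (List Int) × List (List Int) := ([[1, 2], [3, 4]], [[5], [6]])

def Spec_sew (q1 : List (List Int)) (q2 : List (List Int)) (out : List (List Int)) : Prop := out = sew_alt q1 q2
instance (q1 : List (List Int)) (q2 : List (List Int)) (out : List (List Int)) : Decidable (Spec_sew q1 q2 out) := by unfold Spec_sew; infer_instance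

-- ===== CLAIM (what is proved, stated in full; the proofs are below) =====
def Claim_equal_sew : Prop := ∀ (q1 : List (List Int)) (q2 : List (List Int)), Dom_sew q1 q2 → Pre_sew q1 q2 → Spec_sew q1 q2 (sew q1 q2)


-- ===== LEMMAS AND PROOFS =====

-- the value A writes into cell (i, j)
def vcell (q1 q2 : List (List Int)) (i j : Nat) : Int :=
  if j < (q1.getD 0 []).length then (q1.getD i []).getD j 0
  else (q2.getD i []).getD (j - (q1.getD 0 []).length) 0

-- the row B builds at index i
def rowB (q1 q2 : List (List Int)) (i : Nat) : List Int :=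
  (q1.getD i []).take (q1.getD 0 []).length ++ (q2.getD i []).take (q2.getD 0 []).length

def zrow (w : Nat) : List Int := (List.range w).map (fun _ => (0 : Int))

theorem modify_modify_same (l : List (List Int)) (i : Nat) (f g : List Int → List Int) :
    (l.modify i f).modify i g = l.modify i (fun x => g (f x)) := by
  apply List.ext_getElem?
  intro j
  simp only [List.getElem?_modify]
  cases l[j]?
  · simp
  · by_cases h : i = j <;> simp [h]

theorem modify_id' (l : List (List Int)) (i : Nat) : l.modify i (fun x => x) = l := by
  apply List.ext_getElem?
  intro j
  simp [List.getElem?_modify]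

theorem foldl_modify_same (i : Nat) (g : Nat → List Int → List Int) :
    ∀ (L : List Nat) (acc : List (List Int)),
    L.foldl (fun a j => a.modify i (g j)) acc
      = acc.modify i (fun row => L.foldl (fun r j => g j r) row) := by
  intro L
  induction L with
  | nil => intro acc; simp [modify_id' acc i]
  | cons j L ih =>
      intro acc
      simp only [List.foldl_cons]
      rw [ih, modify_modify_same]

theorem fold_set_len (f : Nat → Int) (n : Nat) (row : List Int) :
    ((List.range n).foldl (fun r j => r.set j (f j)) row).length = row.length := by
  induction n with
  | zero => simp
  | succ n ih => rw [List.range_succ, List.foldl_append]; simp [ih]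

theorem fold_set_get? (f : Nat → Int) (n : Nat) (row : List Int) (j : Nat) (hj : j < row.length) :
    ((List.range n).foldl (fun r j => r.set j (f j)) row)[j]?
      = some (if j < n then f j else row.getD j 0) := by
  induction n with
  | zero => simp [List.getD_eq_getElem?_getD, List.getElem?_eq_getElem hj]
  | succ n ih =>
      rw [List.range_succ, List.foldl_append]
      simp only [List.foldl_cons, List.foldl_nil]
      rw [List.getElem?_set]
      by_cases h : n = j
      · subst h
        rw [if_pos rfl, if_pos (by rw [fold_set_len]; exact hj), if_pos (by omega)]
      · rw [if_neg h, ih]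
        by_cases h2 : j < n
        · rw [if_pos h2, if_pos (by omega)]
        · rw [if_neg h2, if_neg (by omega)]

theorem fold_set_eq_map (f : Nat → Int) (n : Nat) (row : List Int) (h : row.length = n) :
    (List.range n).foldl (fun r j => r.set j (f j)) row = (List.range n).map f := by
  apply List.ext_getElem?
  intro j
  by_cases hj : j < n
  · rw [fold_set_get? f n row j (by omega), if_pos hj,
      List.getElem?_map, List.getElem?_range hj]
    rfl
  · rw [List.getElem?_eq_none (by rw [fold_set_len]; omega),
      List.getElem?_eq_none (by simp; omega)]

theorem map_v_eq_rowB (q1 q2 : List (List Int)) (i : Nat)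
    (h1 : (q1.getD 0 []).length ≤ (q1.getD i []).length)
    (h2 : (q2.getD 0 []).length ≤ (q2.getD i []).length) :
    (List.range ((q1.getD 0 []).length + (q2.getD 0 []).length)).map (vcell q1 q2 i)
      = rowB q1 q2 i := by
  apply List.ext_getElem
  · simp only [rowB, List.length_append, List.length_take, List.length_map, List.length_range]
    omega
  · intro j hj hj'
    simp only [List.length_map, List.length_range] at hj
    simp only [List.getElem_map, List.getElem_range]
    unfold vcell rowB
    by_cases hjW : j < (q1.getD 0 []).length
    · rw [if_pos hjW]
      rw [List.getElem_append_left (by simp only [List.length_take]; omega)]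
      rw [List.getElem_take, List.getD_eq_getElem _ _ (by omega)]
    · rw [if_neg hjW]
      rw [List.getElem_append_right (by simp only [List.length_take]; omega)]
      simp only [List.length_take]
      rw [List.getElem_take, List.getD_eq_getElem _ _ (by omega)]
      congr 1
      omega

theorem rowB_length (q1 q2 : List (List Int)) (i : Nat)
    (h1 : (q1.getD 0 []).length ≤ (q1.getD i []).length)
    (h2 : (q2.getD 0 []).length ≤ (q2.getD i []).length) :
    (rowB q1 q2 i).length = (q1.getD 0 []).length + (q2.getD 0 []).length := by
  simp only [rowB, List.length_append, List.length_take]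
  omega

theorem set_map_if (H k : Nat) (g : Nat → List Int) (z : List Int) (hk : k < H) :
    ((List.range H).map (fun i => if i < k then g i else z)).set k (g k)
      = (List.range H).map (fun i => if i < k + 1 then g i else z) := by
  apply List.ext_getElem?
  intro j
  rw [List.getElem?_set]
  by_cases h : k = j
  · subst h
    rw [if_pos rfl, if_pos (by simp [hk]), List.getElem?_map, List.getElem?_range hk]
    simp
  · rw [if_neg h]
    by_cases hjH : j < H
    · rw [List.getElem?_map, List.getElem?_range hjH, List.getElem?_map, List.getElem?_range hjH]
      simp only [Option.map_some]
      by_cases hj : j < k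
      · rw [if_pos hj, if_pos (by omega)]
      · rw [if_neg hj, if_neg (by omega)]
    · rw [List.getElem?_eq_none (by simp; omega), List.getElem?_eq_none (by simp; omega)]

theorem sew_loop (q1 q2 : List (List Int)) (hne : q1 ≠ [])
    (hq1 : ∀ r ∈ q1, (q1.getD 0 []).length ≤ r.length)
    (hq2 : ∀ i, i < q1.length → (q2.getD 0 []).length ≤ (q2.getD i []).length) :
    ∀ (k : Nat), k ≤ q1.length →
    (List.range k).foldl
      (fun acc i =>
        (List.range (acc.getD 0 []).length).foldl
          (fun acc2 j =>
            acc2.modify i (fun row => row.set j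
              (if j < (q1.getD 0 []).length then
                 PySem.List.pyGetD (PySem.List.pyGetD q1 (i : Int) []) (j : Int) 0
               else
                 PySem.List.pyGetD (PySem.List.pyGetD q2 (i : Int) []) ((j : Int) - (((q1.getD 0 []).length : Nat) : Int)) 0)))
          acc)
      (createQuilt q1.length ((q1.getD 0 []).length + (q2.getD 0 []).length))
      = (List.range q1.length).map
          (fun i => if i < k then rowB q1 q2 i
                    else zrow ((q1.getD 0 []).length + (q2.getD 0 []).length)) := by
  have hH : 0 < q1.length := List.length_pos_iff.mpr hne
  have hq1' : ∀ i, i < q1.length → (q1.getD 0 []).length ≤ (q1.getD i []).length := by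
    intro i hi
    exact hq1 _ (by rw [List.getD_eq_getElem _ _ hi]; exact List.getElem_mem hi)
  intro k
  induction k with
  | zero =>
      intro _
      simp only [List.range_zero, List.foldl_nil, createQuilt, zrow]
      apply List.map_congr_left
      intro i _
      simp
  | succ k ih =>
      intro hk
      rw [List.range_succ, List.foldl_append]
      rw [ih (by omega)]
      simp only [List.foldl_cons, List.foldl_nil]
      have hkH : k < q1.length := by omega
      set W1 := (q1.getD 0 []).length with hW1
      set W2 := (q2.getD 0 []).length with hW2
      set S := (List.range q1.length).map
          (fun i => if i < k then rowB q1 q2 i else zrow (W1 + W2)) with hS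
      -- the first row of the current state has length W1 + W2
      have hS0 : (S.getD 0 []).length = W1 + W2 := by
        rw [List.getD_eq_getElem?_getD, hS,
          List.getElem?_map, List.getElem?_range hH]
        by_cases h0 : 0 < k
        · simp only [Option.map_some, Option.getD_some, if_pos h0]
          exact rowB_length q1 q2 0 (hq1' 0 hH) (hq2 0 hH)
        · simp only [Option.map_some, Option.getD_some, if_neg h0, zrow]
          simp
      rw [hS0]
      -- the inner loop only edits row k
      rw [foldl_modify_same k _ (List.range (W1 + W2)) S]
      rw [List.modify_eq_set]
      -- the row being edited is the zero row
      have hrowk : S[k]?.getD default = zrow (W1 + W2) := by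
        rw [hS, List.getElem?_map, List.getElem?_range hkH]
        simp
      rw [hrowk]
      -- overwriting the zero row cell by cell gives exactly row k of the target
      have hfold : (List.range (W1 + W2)).foldl
          (fun r j => r.set j
            (if j < W1 then
               PySem.List.pyGetD (PySem.List.pyGetD q1 (k : Int) []) (j : Int) 0
             else
               PySem.List.pyGetD (PySem.List.pyGetD q2 (k : Int) []) ((j : Int) - ((W1 : Nat) : Int)) 0))
          (zrow (W1 + W2))
          = rowB q1 q2 k := by
        rw [fold_set_eq_map _ _ _ (by simp [zrow])]
        rw [← map_v_eq_rowB q1 q2 k (hq1' k hkH) (hq2 k hkH)]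
        apply List.map_congr_left
        intro j hj
        simp only [PySem.List.pyGetD_natCast]
        unfold vcell
        by_cases hjW : j < W1
        · rw [if_pos hjW, if_pos hjW]
        · rw [if_neg hjW, if_neg hjW]
          have : (j : Int) - ((W1 : Nat) : Int) = ((j - W1 : Nat) : Int) := by
            push_cast [Nat.cast_sub (by omega : W1 ≤ j)]; ring
          rw [this, PySem.List.pyGetD_natCast]
      rw [hfold, hS]
      exact set_map_if q1.length k (rowB q1 q2) (zrow (W1 + W2)) hkH

theorem sew_spec : Claim_equal_sew := by
  intro q1 q2 _ hpre
  obtain ⟨hne, _, _, hq1, hq2⟩ := hpre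
  unfold Spec_sew sew sew_alt
  simp only [PySem.List.pyGetD_zero]
  have hlenQ : (createQuilt q1.length
      ((q1.getD 0 []).length + (q2.getD 0 []).length)).length = q1.length := by
    simp [createQuilt]
  rw [hlenQ]
  rw [sew_loop q1 q2 hne hq1 hq2 q1.length le_rfl]
  apply List.map_congr_left
  intro i hi
  rw [List.mem_range] at hi
  rw [if_pos hi]
  unfold rowB
  simp [PySem.List.pyGetD_natCast]
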